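-- pv_equiv track=rewrite | github.com/yesetoda/leetcode | fiile.py | nastya_and_doors
-- ===== SOURCE A (Python) =====
-- def nastya_and_doors(n, doors):
--     good = [0] * (n + 1)
--     bad = [0] * (n + 1)
--
--     for k in range(1, n + 1):
--         for i in range(0, n, k):
--             if doors[i] == 0:
--                 bad[k] += 1
--             else:
--                 good[k] += 1
--
--     possible_solutions = []
--     for k in range(1, n + 1):
--         if good[k] == bad[k]:
--             possible_solutions.append(k)
--
--     return min(possible_solutions)
-- ===== SOURCE B (Python) =====
-- def nastya_and_doors(n, doors):
--     # Transposed sieve: one balance array diff[k] = good[k]-bad[k], filled by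
--     # walking each position j and crediting its divisors (enumerated up to sqrt(j));
--     # index 0 is visited by every step k, so it seeds the whole array.
--     diff = [0] * (n + 1)
--     v0 = -1 if doors[0] == 0 else 1
--     for k in range(1, n + 1):
--         diff[k] = v0
--     for j in range(1, n):
--         v = -1 if doors[j] == 0 else 1
--         d = 1
--         while d * d <= j:
--             if j % d == 0:
--                 diff[d] += v
--                 q = j // d
--                 if q != d:
--                     diff[q] += v
--             d += 1
--     return min(k for k in range(1, n + 1) if diff[k] == 0)
-- ===== Notes on version B (the rewrite author's own statement) =====
-- stated objective: alternative
-- what changed: Replaces the two count arrays filled by scanning the multiples of every step k with a single balance array filled by crediting each position j to its divisors (enumerated in pairs up to sqrt(j)), position 0 seeding every step.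
import Mathlib
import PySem

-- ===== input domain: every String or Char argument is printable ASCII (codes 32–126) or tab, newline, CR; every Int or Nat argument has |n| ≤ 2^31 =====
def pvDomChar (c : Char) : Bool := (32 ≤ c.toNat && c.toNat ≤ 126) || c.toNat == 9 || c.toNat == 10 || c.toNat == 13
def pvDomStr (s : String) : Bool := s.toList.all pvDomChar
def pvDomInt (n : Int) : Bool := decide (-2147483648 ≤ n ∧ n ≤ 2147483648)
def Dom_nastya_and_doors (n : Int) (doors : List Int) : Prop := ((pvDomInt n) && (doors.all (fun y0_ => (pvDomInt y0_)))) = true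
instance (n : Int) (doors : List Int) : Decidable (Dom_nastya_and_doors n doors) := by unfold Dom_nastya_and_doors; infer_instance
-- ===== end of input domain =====

-- B changes the traversal, not the answer: one balance array filled by crediting each position to its
-- divisor pairs (up to sqrt), instead of A's two count arrays filled by scanning multiples of every step.

-- `lst[i] += v` / `lst[i] = lst[i] + v` (shared by both ports; Pre_ keeps the index in range)
def pvAddAt (xs : List Int) (i v : Int) : List Int :=
  PySem.List.pySetD xs i (PySem.List.pyGetD xs i 0 + v)

-- ===== PORT A =====
def nastya_and_doors (n : Int) (doors : List Int) : Int :=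
  let good := List.replicate (n + 1).toNat (0 : Int)
  let bad := List.replicate (n + 1).toNat (0 : Int)
  let gb := (PySem.List.pyRange 1 (n + 1) 1).foldl (fun gb k =>
      (PySem.List.pyRange 0 n k).foldl (fun gb i =>
        if PySem.List.pyGetD doors i 0 == 0 then
          (gb.1, pvAddAt gb.2 k 1)
        else
          (pvAddAt gb.1 k 1, gb.2)) gb) (good, bad)
  let possible_solutions := (PySem.List.pyRange 1 (n + 1) 1).foldl (fun acc k =>
      if PySem.List.pyGetD gb.1 k 0 == PySem.List.pyGetD gb.2 k 0 then acc ++ [k] else acc) []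
  -- min(possible_solutions): Pre_ guarantees nonemptiness (empty = Python ValueError)
  (PySem.List.min? possible_solutions (fun x => x)).getD 0

-- ===== PORT B =====
-- Source B's `while d * d <= j` divisor-pair loop
def pvDivLoop (j v d : Int) (diff : List Int) : List Int :=
  if h : d * d ≤ j then
    let diff' :=
      if PySem.Int.mod j d == 0 then
        let diff1 := pvAddAt diff d v
        let q := PySem.Int.floordiv j d
        if q ≠ d then pvAddAt diff1 q v else diff1
      else diff
    pvDivLoop j v (d + 1) diff'
  else diff
termination_by (j + 1 - d).toNat
decreasing_by
  have hdj : d ≤ j := by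
    by_cases h0 : d ≤ 0
    · nlinarith
    · nlinarith
  omega

def nastya_and_doors_alt (n : Int) (doors : List Int) : Int :=
  let diff0 := List.replicate (n + 1).toNat (0 : Int)
  let v0 : Int := if PySem.List.pyGetD doors 0 0 == 0 then -1 else 1
  let diff1 := (PySem.List.pyRange 1 (n + 1) 1).foldl (fun dl k => PySem.List.pySetD dl k v0) diff0
  let diff2 := (PySem.List.pyRange 1 n 1).foldl (fun dl j =>
      pvDivLoop j (if PySem.List.pyGetD doors j 0 == 0 then -1 else 1) 1 dl) diff1
  -- min(generator): Pre_ guarantees nonemptiness (empty = Python ValueError)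
  (PySem.List.min? ((PySem.List.pyRange 1 (n + 1) 1).filter
      (fun k => PySem.List.pyGetD diff2 k 0 == 0)) (fun x => x)).getD 0

-- ===== PRECONDITION & SPEC =====
-- balance of step k: ±1 per visited index (closed door = -1); used only to state Pre_
def pvDoorBalance (doors : List Int) (n k : Int) : Int :=
  ((PySem.List.pyRange 0 n k).map
    (fun i => if PySem.List.pyGetD doors i 0 == 0 then (-1 : Int) else 1)).sum

-- Pre_ excludes exactly the inputs on which Python A raises: n < 1 or no step is balanced
-- (min of an empty list, ValueError), or doors shorter than n (IndexError).
def Pre_nastya_and_doors (n : Int) (doors : List Int) : Prop :=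
  1 ≤ n ∧ n ≤ (doors.length : Int) ∧
    ∃ k ∈ PySem.List.pyRange 1 (n + 1) 1, pvDoorBalance doors n k = 0
instance (n : Int) (doors : List Int) : Decidable (Pre_nastya_and_doors n doors) := by
  unfold Pre_nastya_and_doors; infer_instance

def pvWitness_nastya_and_doors : Int × List Int := (2, [1, 0])

def Spec_nastya_and_doors (n : Int) (doors : List Int) (out : Int) : Prop := out = nastya_and_doors_alt n doors
instance (n : Int) (doors : List Int) (out : Int) : Decidable (Spec_nastya_and_doors n doors out) := by unfold Spec_nastya_and_doors; infer_instance

-- ===== CLAIM (what is proved, stated in full; the proofs are below) =====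
def Claim_equal_nastya_and_doors : Prop := ∀ (n : Int) (doors : List Int), Dom_nastya_and_doors n doors → Pre_nastya_and_doors n doors → Spec_nastya_and_doors n doors (nastya_and_doors n doors)

-- ===== LEMMAS AND PROOFS =====

-- door i closed / its ±1 value
def pvClosed (doors : List Int) (i : Int) : Bool := PySem.List.pyGetD doors i 0 == 0
def pvVal (doors : List Int) (i : Int) : Int := if pvClosed doors i then -1 else 1

theorem length_pvAddAt (xs : List Int) (i v : Int) : (pvAddAt xs i v).length = xs.length := by
  simp [pvAddAt, PySem.List.length_pySetD]

theorem pyGetD_pySetD_int (xs : List Int) (k m v : Int) (hk : 0 ≤ k) (hkl : k < (xs.length : Int))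
    (hm : 0 ≤ m) :
    PySem.List.pyGetD (PySem.List.pySetD xs k v) m 0 = if m = k then v else PySem.List.pyGetD xs m 0 := by
  have h1 : k = ((k.toNat : Nat) : Int) := by omega
  have h2 : m = ((m.toNat : Nat) : Int) := by omega
  rw [h1, h2, PySem.List.pyGetD_pySetD_natCast xs k.toNat m.toNat v 0 (by omega)]
  by_cases h : m = k
  · rw [if_pos (by omega), if_pos (by omega)]
  · rw [if_neg (by omega), if_neg (by omega)]

theorem pyGetD_pvAddAt (xs : List Int) (k m v : Int) (hk : 0 ≤ k) (hkl : k < (xs.length : Int))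
    (hm : 0 ≤ m) :
    PySem.List.pyGetD (pvAddAt xs k v) m 0 =
      PySem.List.pyGetD xs m 0 + (if m = k then v else 0) := by
  unfold pvAddAt
  rw [pyGetD_pySetD_int xs k m _ hk hkl hm]
  by_cases h : m = k
  · subst h; simp
  · simp [h]

theorem getD_replicate_zero (N : Nat) (k : Int) (hk : 0 ≤ k) :
    PySem.List.pyGetD (List.replicate N (0 : Int)) k 0 = 0 := by
  have h1 : k = ((k.toNat : Nat) : Int) := by omega
  rw [h1, PySem.List.pyGetD_natCast]
  by_cases h : k.toNat < N
  · simp [List.getD, h]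
  · simp [List.getD, h]

-- generic: a fold whose every step adds `delta k m` at position m (and keeps the length)
theorem getD_foldl_delta (ks : List Int) (step : List Int → Int → List Int) (delta : Int → Int → Int)
    (N : Nat) (m : Int) (hm : 0 ≤ m)
    (hstep : ∀ a k, k ∈ ks → a.length = N → (step a k).length = N ∧
      PySem.List.pyGetD (step a k) m 0 = PySem.List.pyGetD a m 0 + delta k m)
    (g : List Int) (hg : g.length = N) :
    PySem.List.pyGetD (ks.foldl step g) m 0 =
      PySem.List.pyGetD g m 0 + (ks.map (fun k => delta k m)).sum := by
  induction ks generalizing g with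
  | nil => simp
  | cons k t ih =>
    obtain ⟨hlen, hget⟩ := hstep g k (by simp) hg
    rw [List.foldl_cons, ih (fun a k' hk' ha => hstep a k' (by simp [hk']) ha) _ hlen, hget]
    simp [List.map_cons, List.sum_cons]
    ring

-- the inner multiples-scan of A adds the count at its own index k and nothing elsewhere
theorem inner_count (L : List Int) (c : Int → Bool) (k : Int) (hk : 0 ≤ k) (a : List Int)
    (hkl : k < (a.length : Int)) (m : Int) (hm : 0 ≤ m) :
    (L.foldl (fun g i => if c i then pvAddAt g k 1 else g) a).length = a.length ∧
      PySem.List.pyGetD (L.foldl (fun g i => if c i then pvAddAt g k 1 else g) a) m 0 =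
        PySem.List.pyGetD a m 0 + (if m = k then (L.countP c : Int) else 0) := by
  induction L generalizing a with
  | nil => simp
  | cons i t ih =>
    rw [List.foldl_cons]
    by_cases hc : c i
    · rw [if_pos hc]
      have hlen : (pvAddAt a k 1).length = a.length := length_pvAddAt a k 1
      obtain ⟨ih1, ih2⟩ := ih (pvAddAt a k 1) (by rw [hlen]; exact hkl)
      constructor
      · rw [ih1, hlen]
      · rw [ih2, pyGetD_pvAddAt a k m 1 hk hkl hm, List.countP_cons, hc]
        by_cases h : m = k <;> simp [h] <;> ring
    · obtain ⟨ih1, ih2⟩ := ih a hkl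
      rw [if_neg hc]
      refine ⟨ih1, ?_⟩
      rw [ih2, List.countP_cons]
      simp [hc]

theorem sum_map_ite_eq_of_nodup (ks : List Int) (hnd : ks.Nodup) (w : Int → Int) (k : Int)
    (hk : k ∈ ks) :
    (ks.map (fun k' => if k = k' then w k' else 0)).sum = w k := by
  induction ks with
  | nil => simp at hk
  | cons x t ih =>
    rw [List.map_cons, List.sum_cons]
    rcases List.mem_cons.mp hk with h | h
    · subst h
      rw [if_pos rfl]
      have : (t.map (fun k' => if k = k' then w k' else 0)).sum = 0 := by
        apply List.sum_eq_zero
        intro y hy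
        obtain ⟨k', hk', rfl⟩ := List.mem_map.mp hy
        have : k ≠ k' := fun he => (List.nodup_cons.mp hnd).1 (he ▸ hk')
        simp [this]
      rw [this]; ring
    · have hne : k ≠ x := fun he => (List.nodup_cons.mp hnd).1 (he ▸ h)
      rw [if_neg hne, ih (List.nodup_cons.mp hnd).2 h]
      ring

-- B phase 1: writing v0 at every position of ks
theorem getD_foldl_set (ks : List Int) (v : Int) (g : List Int)
    (hks : ∀ k ∈ ks, 0 ≤ k ∧ k < (g.length : Int)) (m : Int) (hm : 0 ≤ m) :
    PySem.List.pyGetD (ks.foldl (fun a k => PySem.List.pySetD a k v) g) m 0 =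
      if m ∈ ks then v else PySem.List.pyGetD g m 0 := by
  induction ks generalizing g with
  | nil => simp
  | cons k t ih =>
    obtain ⟨hk0, hkl⟩ := hks k (by simp)
    rw [List.foldl_cons, ih _ (fun k' hk' => by
      rw [PySem.List.length_pySetD]; exact hks k' (by simp [hk']))]
    by_cases hmt : m ∈ t
    · simp [hmt]
    · rw [if_neg hmt, pyGetD_pySetD_int g k m v hk0 hkl hm]
      by_cases h : m = k
      · simp [h]
      · simp [h, hmt]

theorem sum_map_ite_filter (L : List Int) (p : Int → Bool) (f : Int → Int) :
    (L.map (fun x => if p x then f x else 0)).sum = ((L.filter p).map f).sum := by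
  induction L with
  | nil => simp
  | cons x t ih =>
    rw [List.map_cons, List.sum_cons, List.filter_cons]
    by_cases h : p x <;> simp [h, ih]

theorem sum_map_pvVal (doors : List Int) (L : List Int) :
    (L.map (pvVal doors)).sum =
      (L.countP (fun i => !pvClosed doors i) : Int) - (L.countP (pvClosed doors) : Int) := by
  induction L with
  | nil => simp
  | cons x t ih =>
    rw [List.map_cons, List.sum_cons, List.countP_cons, List.countP_cons, ih]
    unfold pvVal
    by_cases h : pvClosed doors x <;> simp [h] <;> ring

-- the multiples of k below n are 0 together with the j ∈ [1, n) divisible by k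
def pvDivStep (j v d : Int) (diff : List Int) : List Int :=
  if PySem.Int.mod j d == 0 then
    (if PySem.Int.floordiv j d ≠ d then pvAddAt (pvAddAt diff d v) (PySem.Int.floordiv j d) v
     else pvAddAt diff d v)
  else diff

theorem pvDivLoop_eq (j v d : Int) (diff : List Int) :
    pvDivLoop j v d diff =
      if d * d ≤ j then pvDivLoop j v (d + 1) (pvDivStep j v d diff) else diff := by
  rw [pvDivLoop]
  unfold pvDivStep
  split
  · rfl
  · rfl

theorem length_pvDivStep (j v d : Int) (diff : List Int) :
    (pvDivStep j v d diff).length = diff.length := by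
  unfold pvDivStep
  split
  · split <;> simp [length_pvAddAt]
  · rfl

theorem length_pvDivLoop (j v : Int) : ∀ (N : Nat) (d : Int) (diff : List Int),
    (j + 1 - d).toNat = N → (pvDivLoop j v d diff).length = diff.length := by
  intro N
  induction N using Nat.strong_induction_on with
  | _ N ih =>
    intro d diff hN
    rw [pvDivLoop_eq]
    by_cases h : d * d ≤ j
    · rw [if_pos h]
      have hdj : d ≤ j := by
        by_cases h0 : d ≤ 0
        · nlinarith
        · nlinarith
      rw [ih (j + 1 - (d+1)).toNat (by omega) (d+1) _ rfl, length_pvDivStep]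
    · rw [if_neg h]
theorem getD_pvDivStep (j v d : Int) (diff : List Int) (hj : 1 ≤ j) (hd : 1 ≤ d)
    (hdd : d * d ≤ j) (hlen : j < (diff.length : Int)) (m : Int) (hm : 0 ≤ m) :
    PySem.List.pyGetD (pvDivStep j v d diff) m 0 = PySem.List.pyGetD diff m 0 +
      (if d ∣ j ∧ m = d then v else 0) +
      (if d ∣ j ∧ m = PySem.Int.floordiv j d ∧ PySem.Int.floordiv j d ≠ d then v else 0) := by
  have hdj : d ≤ j := by nlinarith
  have hdlen : d < (diff.length : Int) := by omega
  unfold pvDivStep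
  by_cases hdvd : d ∣ j
  · have hmod : (PySem.Int.mod j d == 0) = true := by
      simp [PySem.Int.mod_eq_zero_iff_dvd, hdvd]
    rw [if_pos hmod]
    have hqe : PySem.Int.floordiv j d = j / d := PySem.Int.floordiv_eq_ediv_of_pos (by omega)
    set q := PySem.Int.floordiv j d with hqdef
    have hq : d * q = j := by rw [hqe]; exact Int.mul_ediv_cancel' hdvd
    have hq1 : 1 ≤ q := by nlinarith
    have hqj : q ≤ j := by nlinarith
    have hqlen : q < (diff.length : Int) := by omega
    by_cases hqd : q ≠ d
    · rw [if_pos hqd]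
      rw [pyGetD_pvAddAt _ q m v (by omega) (by rw [length_pvAddAt]; exact hqlen) hm,
          pyGetD_pvAddAt _ d m v (by omega) hdlen hm]
      by_cases h1 : m = d <;> by_cases h2 : m = q <;>
        simp [h1, h2, hdvd, hqd]
    · rw [if_neg hqd]
      rw [pyGetD_pvAddAt _ d m v (by omega) hdlen hm]
      by_cases h1 : m = d <;> simp [h1, hdvd, hqd]
  · have hmod : ¬ (PySem.Int.mod j d == 0) = true := by
      simp [PySem.Int.mod_eq_zero_iff_dvd, hdvd]
    rw [if_neg hmod]
    simp [hdvd]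
theorem indicator_eq (j d m v : Int) (hj : 1 ≤ j) (hd : 1 ≤ d) (hm : 0 ≤ m) (h : d * d ≤ j) :
    (if d ∣ j ∧ m = d then v else 0) +
      (if d ∣ j ∧ m = PySem.Int.floordiv j d ∧ PySem.Int.floordiv j d ≠ d then v else 0) +
      (if m ∣ j ∧ d + 1 ≤ m ∧ (d + 1) * m ≤ j then v else 0)
    = (if m ∣ j ∧ d ≤ m ∧ d * m ≤ j then v else 0) := by
  have hqe : PySem.Int.floordiv j d = j / d := PySem.Int.floordiv_eq_ediv_of_pos (by omega)
  generalize hq0 : PySem.Int.floordiv j d = q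
  rw [hq0] at hqe
  by_cases hmj : m ∣ j
  · have hm0 : m ≠ 0 := by rintro rfl; rw [Int.zero_dvd] at hmj; omega
    have hm1 : 1 ≤ m := by omega
    obtain ⟨c, hc⟩ := hmj
    have hc1 : 1 ≤ c := by nlinarith
    by_cases hmd : m = d
    · rw [if_pos ⟨hmd ▸ ⟨c, hc⟩, hmd⟩,
          if_neg (by rintro ⟨_, h1, hne⟩; omega),
          if_neg (by rintro ⟨_, h1, _⟩; omega),
          if_pos ⟨⟨c, hc⟩, by omega, by nlinarith⟩]
      ring
    · rw [if_neg (by rintro ⟨_, h1⟩; exact hmd h1)]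
      by_cases hdj : d ∣ j
      · have hq : d * q = j := by rw [hqe]; exact Int.mul_ediv_cancel' hdj
        by_cases hmq : m = q
        · have hqd : q ≠ d := hmq ▸ hmd
          have hqm : d * m = j := by rw [hmq]; exact hq
          rw [if_pos ⟨hdj, hmq, hqd⟩]
          have hdm : d ≤ m := by nlinarith
          rw [if_neg (by rintro ⟨_, _, h3⟩; nlinarith),
              if_pos ⟨⟨c, hc⟩, hdm, by nlinarith⟩]
          ring
        · rw [if_neg (by rintro ⟨_, h2, _⟩; exact hmq h2)]
          by_cases hCd : d ≤ m ∧ d * m ≤ j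
          · obtain ⟨h1, h2⟩ := hCd
            have hdc : d ≤ c := by nlinarith
            have hcd : c ≠ d := by
              intro hcd0
              apply hmq
              have h3 : d * m = j := by rw [hc, hcd0]; ring
              exact mul_left_cancel₀ (by omega : d ≠ 0) (h3.trans hq.symm)
            have hdc1 : d + 1 ≤ c := by omega
            have h5 : (d + 1) * m ≤ j := by nlinarith
            rw [if_pos ⟨⟨c, hc⟩, by omega, h5⟩, if_pos ⟨⟨c, hc⟩, h1, h2⟩]
            ring
          · rw [if_neg (by rintro ⟨_, h1, h2⟩; exact hCd ⟨by omega, by nlinarith⟩),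
                if_neg (by rintro ⟨_, h1, h2⟩; exact hCd ⟨h1, h2⟩)]
            ring
      · rw [if_neg (by rintro ⟨h1, _⟩; exact hdj h1)]
        by_cases hCd : d ≤ m ∧ d * m ≤ j
        · obtain ⟨h1, h2⟩ := hCd
          have hdc : d ≤ c := by nlinarith
          have hcd : c ≠ d := by
            intro hcd0
            exact hdj ⟨m, by rw [hc, hcd0]; ring⟩
          have hdc1 : d + 1 ≤ c := by omega
          have h5 : (d + 1) * m ≤ j := by nlinarith
          rw [if_pos ⟨⟨c, hc⟩, by omega, h5⟩, if_pos ⟨⟨c, hc⟩, h1, h2⟩]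
          ring
        · rw [if_neg (by rintro ⟨_, h1, h2⟩; exact hCd ⟨by omega, by nlinarith⟩),
              if_neg (by rintro ⟨_, h1, h2⟩; exact hCd ⟨h1, h2⟩)]
          ring
  · have hqdvd : d ∣ j → q ∣ j := by
      intro hdj
      have hq : d * q = j := by rw [hqe]; exact Int.mul_ediv_cancel' hdj
      exact ⟨d, by linarith [hq]⟩
    rw [if_neg (by rintro ⟨h1, h2⟩; exact hmj (h2 ▸ h1)),
        if_neg (by rintro ⟨h1, h2, _⟩; exact hmj (h2 ▸ hqdvd h1)),
        if_neg (by rintro ⟨h1, _⟩; exact hmj h1),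
        if_neg (by rintro ⟨h1, _⟩; exact hmj h1)]
    ring
theorem getD_pvDivLoop (j v : Int) : ∀ (N : Nat) (d : Int) (diff : List Int),
    (j + 1 - d).toNat = N → 1 ≤ j → 1 ≤ d → j < (diff.length : Int) → ∀ m, 0 ≤ m →
    PySem.List.pyGetD (pvDivLoop j v d diff) m 0 =
      PySem.List.pyGetD diff m 0 + (if m ∣ j ∧ d ≤ m ∧ d * m ≤ j then v else 0) := by
  intro N
  induction N using Nat.strong_induction_on with
  | _ N ih =>
    intro d diff hN hj hd hlen m hm
    rw [pvDivLoop_eq]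
    by_cases h : d * d ≤ j
    · rw [if_pos h]
      have hdj : d ≤ j := by nlinarith
      rw [ih (j + 1 - (d + 1)).toNat (by omega) (d + 1) _ rfl hj (by omega)
            (by rw [length_pvDivStep]; exact hlen) m hm,
          getD_pvDivStep j v d diff hj hd h hlen m hm]
      have := indicator_eq j d m v hj hd hm h
      linarith [this]
    · rw [if_neg h]
      have : ¬ (m ∣ j ∧ d ≤ m ∧ d * m ≤ j) := by
        rintro ⟨⟨c, hc⟩, h1, h2⟩
        have hm1 : 1 ≤ m := by
          rcases eq_or_ne m 0 with rfl | hm0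
          · simp at hc; omega
          · omega
        have hc1 : 1 ≤ c := by nlinarith
        have hdc : d ≤ c := by nlinarith
        exact h (by nlinarith)
      rw [if_neg this]
      ring
theorem pyRange_step_eq (n k : Int) (hn : 1 ≤ n) (hk : 1 ≤ k) :
    PySem.List.pyRange 0 n k =
      0 :: (PySem.List.pyRange 1 n 1).filter (fun j => decide (k ∣ j)) := by
  have hmemL : ∀ x, x ∈ PySem.List.pyRange 0 n k ↔ 0 ≤ x ∧ x < n ∧ k ∣ x := by
    intro x
    rw [PySem.List.mem_pyRange_iff_of_pos (by omega)]
    constructor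
    · rintro ⟨h1, h2, h3⟩; exact ⟨h1, h2, by simpa using h3⟩
    · rintro ⟨h1, h2, h3⟩; exact ⟨h1, h2, by simpa using h3⟩
  have hmemR : ∀ x, x ∈ 0 :: (PySem.List.pyRange 1 n 1).filter (fun j => decide (k ∣ j)) ↔
      x = 0 ∨ (1 ≤ x ∧ x < n ∧ k ∣ x) := by
    intro x
    simp [List.mem_filter, PySem.List.mem_pyRange_one]
    tauto
  have hpairL : List.Pairwise (· < ·) (PySem.List.pyRange 0 n k) := by
    rw [PySem.List.pyRange_of_pos 0 n (by omega)]
    refine List.Pairwise.map _ ?_ (List.pairwise_lt_range)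
    intro a b hab
    have hab2 : (a : Int) < b := by exact_mod_cast hab
    have hab3 := mul_lt_mul_of_pos_left hab2 (show (0:Int) < k by omega)
    linarith
  have hpairR : List.Pairwise (· < ·)
      (0 :: (PySem.List.pyRange 1 n 1).filter (fun j => decide (k ∣ j))) := by
    refine List.Pairwise.cons ?_ (List.Pairwise.sublist (List.filter_sublist) (PySem.List.pairwise_lt_pyRange_one 1 n))
    intro x hx
    have := (List.mem_filter.mp hx).1
    rw [PySem.List.mem_pyRange_one] at this
    omega
  have hndL : (PySem.List.pyRange 0 n k).Nodup := hpairL.imp ne_of_lt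
  have hndR : (0 :: (PySem.List.pyRange 1 n 1).filter (fun j => decide (k ∣ j))).Nodup :=
    hpairR.imp ne_of_lt
  have hperm : (PySem.List.pyRange 0 n k).Perm
      (0 :: (PySem.List.pyRange 1 n 1).filter (fun j => decide (k ∣ j))) := by
    rw [List.perm_ext_iff_of_nodup hndL hndR]
    intro x
    rw [hmemL, hmemR]
    constructor
    · rintro ⟨h1, h2, h3⟩
      rcases eq_or_ne x 0 with rfl | hx0
      · exact Or.inl rfl
      · exact Or.inr ⟨by omega, h2, h3⟩
    · rintro (rfl | ⟨h1, h2, h3⟩)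
      · exact ⟨le_refl 0, by omega, dvd_zero k⟩
      · exact ⟨by omega, h2, h3⟩
  exact List.Perm.eq_of_pairwise (fun a b _ _ h1 h2 => absurd h2 (lt_asymm h1)) hpairL hpairR hperm
theorem A_char (n : Int) (doors : List Int) (hn : 1 ≤ n) :
    nastya_and_doors n doors =
      (PySem.List.min? ((PySem.List.pyRange 1 (n + 1) 1).filter (fun k =>
          (((PySem.List.pyRange 0 n k).countP (fun i => !(PySem.List.pyGetD doors i 0 == 0)) : Int) ==
            ((PySem.List.pyRange 0 n k).countP (fun i => PySem.List.pyGetD doors i 0 == 0) : Int))))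
        (fun x => x)).getD 0 := by
  unfold nastya_and_doors
  have houter : (fun (gb : List Int × List Int) (k : Int) =>
        (PySem.List.pyRange 0 n k).foldl (fun gb i =>
          if PySem.List.pyGetD doors i 0 == 0 then (gb.1, pvAddAt gb.2 k 1)
          else (pvAddAt gb.1 k 1, gb.2)) gb)
      = (fun gb k =>
          ((PySem.List.pyRange 0 n k).foldl
            (fun g i => if !(PySem.List.pyGetD doors i 0 == 0) then pvAddAt g k 1 else g) gb.1,
           (PySem.List.pyRange 0 n k).foldl
            (fun b i => if PySem.List.pyGetD doors i 0 == 0 then pvAddAt b k 1 else b) gb.2)) := by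
    funext gb k
    have hin : (fun (gb : List Int × List Int) (i : Int) =>
          if PySem.List.pyGetD doors i 0 == 0 then (gb.1, pvAddAt gb.2 k 1)
          else (pvAddAt gb.1 k 1, gb.2))
        = (fun gb i =>
            ((fun g (i : Int) => if !(PySem.List.pyGetD doors i 0 == 0) then pvAddAt g k 1 else g) gb.1 i,
             (fun b (i : Int) => if PySem.List.pyGetD doors i 0 == 0 then pvAddAt b k 1 else b) gb.2 i)) := by
      funext gb i
      by_cases h : PySem.List.pyGetD doors i 0 == 0 <;> simp [h]
    rw [hin]
    conv_lhs => rw [← Prod.mk.eta (p := gb)]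
    exact PySem.List.foldl_prod_mk
      (fun g i => if !(PySem.List.pyGetD doors i 0 == 0) then pvAddAt g k 1 else g)
      (fun b i => if PySem.List.pyGetD doors i 0 == 0 then pvAddAt b k 1 else b)
      (PySem.List.pyRange 0 n k) gb.1 gb.2
  rw [houter]
  dsimp only
  have hsplit : List.foldl (fun (gb : List Int × List Int) (k : Int) =>
        (List.foldl (fun g i => if !(PySem.List.pyGetD doors i 0 == 0) then pvAddAt g k 1 else g)
          gb.1 (PySem.List.pyRange 0 n k),
         List.foldl (fun b i => if PySem.List.pyGetD doors i 0 == 0 then pvAddAt b k 1 else b)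
          gb.2 (PySem.List.pyRange 0 n k)))
      (List.replicate (n + 1).toNat 0, List.replicate (n + 1).toNat 0)
      (PySem.List.pyRange 1 (n + 1)) =
      (List.foldl (fun g k =>
          List.foldl (fun g i => if !(PySem.List.pyGetD doors i 0 == 0) then pvAddAt g k 1 else g)
            g (PySem.List.pyRange 0 n k)) (List.replicate (n + 1).toNat 0)
          (PySem.List.pyRange 1 (n + 1)),
       List.foldl (fun b k =>
          List.foldl (fun b i => if PySem.List.pyGetD doors i 0 == 0 then pvAddAt b k 1 else b)
            b (PySem.List.pyRange 0 n k)) (List.replicate (n + 1).toNat 0)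
          (PySem.List.pyRange 1 (n + 1))) :=
    PySem.List.foldl_prod_mk
      (fun g k =>
        List.foldl (fun g i => if !(PySem.List.pyGetD doors i 0 == 0) then pvAddAt g k 1 else g)
          g (PySem.List.pyRange 0 n k))
      (fun b k =>
        List.foldl (fun b i => if PySem.List.pyGetD doors i 0 == 0 then pvAddAt b k 1 else b)
          b (PySem.List.pyRange 0 n k))
      (PySem.List.pyRange 1 (n + 1))
      (List.replicate (n + 1).toNat 0) (List.replicate (n + 1).toNat 0)
  rw [hsplit]
  dsimp only
  rw [PySem.List.foldl_append_if
    (fun k => PySem.List.pyGetD ((PySem.List.pyRange 1 (n + 1) 1).foldl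
        (fun g k => (PySem.List.pyRange 0 n k).foldl
          (fun g i => if !(PySem.List.pyGetD doors i 0 == 0) then pvAddAt g k 1 else g) g)
        (List.replicate (n + 1).toNat (0 : Int))) k 0 ==
      PySem.List.pyGetD ((PySem.List.pyRange 1 (n + 1) 1).foldl
        (fun b k => (PySem.List.pyRange 0 n k).foldl
          (fun b i => if PySem.List.pyGetD doors i 0 == 0 then pvAddAt b k 1 else b) b)
        (List.replicate (n + 1).toNat (0 : Int))) k 0)
    (fun k => k) (PySem.List.pyRange 1 (n + 1) 1) []]
  simp only [List.nil_append, List.map_id']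
  congr 2
  apply List.filter_congr
  intro k hk
  obtain ⟨hk1, hk2⟩ := (PySem.List.mem_pyRange_one (a := 1) (b := n + 1) (x := k)).mp hk
  have hNlen : (List.replicate (n + 1).toNat (0 : Int)).length = (n + 1).toNat := by simp
  have hchar : ∀ c : Int → Bool,
      PySem.List.pyGetD ((PySem.List.pyRange 1 (n + 1) 1).foldl
        (fun g k' => (PySem.List.pyRange 0 n k').foldl
          (fun g i => if c i then pvAddAt g k' 1 else g) g)
        (List.replicate (n + 1).toNat (0 : Int))) k 0
      = ((PySem.List.pyRange 0 n k).countP c : Int) := by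
    intro c
    rw [getD_foldl_delta (PySem.List.pyRange 1 (n + 1) 1) _
          (fun k' m => if m = k' then ((PySem.List.pyRange 0 n k').countP c : Int) else 0)
          (n + 1).toNat k (by omega)
          (fun a k' hk' ha => by
            obtain ⟨h1, h2⟩ := (PySem.List.mem_pyRange_one (a := 1) (b := n + 1) (x := k')).mp hk'
            obtain ⟨hl, hv⟩ := inner_count (PySem.List.pyRange 0 n k') c k' (by omega) a
              (by rw [ha]; omega) k (by omega)
            exact ⟨by rw [hl, ha], hv⟩)
          (List.replicate (n + 1).toNat (0 : Int)) hNlen]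
    rw [getD_replicate_zero _ k (by omega),
        sum_map_ite_eq_of_nodup _ (PySem.List.nodup_pyRange_one 1 (n + 1)) _ k hk]
    ring
  rw [hchar, hchar]

theorem length_foldl_set (ks : List Int) (v : Int) (g : List Int) :
    (ks.foldl (fun a k => PySem.List.pySetD a k v) g).length = g.length := by
  induction ks generalizing g with
  | nil => rfl
  | cons k t ih => rw [List.foldl_cons, ih, PySem.List.length_pySetD]

theorem B_char (n : Int) (doors : List Int) (hn : 1 ≤ n) :
    nastya_and_doors_alt n doors =
      (PySem.List.min? ((PySem.List.pyRange 1 (n + 1) 1).filter (fun k =>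
          ((pvVal doors 0 + ((PySem.List.pyRange 1 n 1).map (fun j =>
             if k ∣ j ∧ 1 ≤ k ∧ 1 * k ≤ j then pvVal doors j else 0)).sum) == 0)))
        (fun x => x)).getD 0 := by
  unfold nastya_and_doors_alt
  dsimp only
  have hfc : List.filter (fun k =>
        PySem.List.pyGetD (List.foldl
          (fun dl j => pvDivLoop j (if PySem.List.pyGetD doors j 0 == 0 then (-1:Int) else 1) 1 dl)
          (List.foldl (fun dl k => PySem.List.pySetD dl k
              (if PySem.List.pyGetD doors 0 0 == 0 then (-1:Int) else 1))
            (List.replicate (n + 1).toNat 0) (PySem.List.pyRange 1 (n + 1)))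
          (PySem.List.pyRange 1 n)) k 0 == 0)
      (PySem.List.pyRange 1 (n + 1)) =
      List.filter (fun k =>
        (pvVal doors 0 + ((PySem.List.pyRange 1 n 1).map (fun j =>
           if k ∣ j ∧ 1 ≤ k ∧ 1 * k ≤ j then pvVal doors j else 0)).sum) == 0)
      (PySem.List.pyRange 1 (n + 1)) := by
    apply List.filter_congr
    intro k hk
    obtain ⟨hk1, hk2⟩ := (PySem.List.mem_pyRange_one (a := 1) (b := n + 1) (x := k)).mp hk
    have hlen1 : (List.foldl (fun dl k => PySem.List.pySetD dl k
        (if PySem.List.pyGetD doors 0 0 == 0 then (-1:Int) else 1))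
        (List.replicate (n + 1).toNat 0) (PySem.List.pyRange 1 (n + 1))).length = (n + 1).toNat := by
      rw [length_foldl_set]; simp
    rw [getD_foldl_delta (PySem.List.pyRange 1 n 1)
        (fun dl j => pvDivLoop j (if PySem.List.pyGetD doors j 0 == 0 then (-1:Int) else 1) 1 dl)
        (fun j m => if m ∣ j ∧ 1 ≤ m ∧ 1 * m ≤ j then pvVal doors j else 0)
        (n + 1).toNat k (by omega)
        (fun a j hj ha => by
          obtain ⟨hj1, hj2⟩ := (PySem.List.mem_pyRange_one (a := 1) (b := n) (x := j)).mp hj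
          have hjlen : j < (a.length : Int) := by rw [ha]; omega
          refine ⟨?_, ?_⟩
          · rw [length_pvDivLoop j _ (j + 1 - 1).toNat 1 a rfl, ha]
          · exact getD_pvDivLoop j _ (j + 1 - 1).toNat 1 a rfl (by omega) le_rfl hjlen k (by omega))
        _ hlen1,
      getD_foldl_set (PySem.List.pyRange 1 (n + 1) 1) _ (List.replicate (n + 1).toNat 0)
        (fun k' hk' => by
          obtain ⟨h1, h2⟩ := (PySem.List.mem_pyRange_one (a := 1) (b := n + 1) (x := k')).mp hk'
          constructor
          · omega
          · simp; omega)
        k (by omega),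
      if_pos hk]
    rfl
  rw [hfc]

theorem main_eq (n : Int) (doors : List Int) :
    nastya_and_doors n doors = nastya_and_doors_alt n doors := by
  by_cases hn : 1 ≤ n
  · rw [A_char n doors hn, B_char n doors hn]
    have hfc : List.filter (fun k =>
          (((PySem.List.pyRange 0 n k).countP (fun i => !(PySem.List.pyGetD doors i 0 == 0)) : Int) ==
            ((PySem.List.pyRange 0 n k).countP (fun i => PySem.List.pyGetD doors i 0 == 0) : Int)))
        (PySem.List.pyRange 1 (n + 1) 1) =
        List.filter (fun k =>
          ((pvVal doors 0 + ((PySem.List.pyRange 1 n 1).map (fun j =>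
             if k ∣ j ∧ 1 ≤ k ∧ 1 * k ≤ j then pvVal doors j else 0)).sum) == 0))
        (PySem.List.pyRange 1 (n + 1) 1) := by
      apply List.filter_congr
      intro k hk
      obtain ⟨hk1, hk2⟩ := (PySem.List.mem_pyRange_one (a := 1) (b := n + 1) (x := k)).mp hk
      have hmc : ∀ j ∈ PySem.List.pyRange 1 n 1,
          (if k ∣ j ∧ 1 ≤ k ∧ 1 * k ≤ j then pvVal doors j else 0) =
          (if decide (k ∣ j) then pvVal doors j else 0) := by
        intro j hj
        obtain ⟨hj1, hj2⟩ := (PySem.List.mem_pyRange_one (a := 1) (b := n) (x := j)).mp hj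
        by_cases hd : k ∣ j
        · rw [if_pos ⟨hd, by omega, by have := Int.le_of_dvd (by omega) hd; omega⟩,
              if_pos (by simpa using hd)]
        · rw [if_neg (by tauto), if_neg (by simpa using hd)]
      have hval : pvVal doors 0 + ((PySem.List.pyRange 1 n 1).map (fun j =>
             if k ∣ j ∧ 1 ≤ k ∧ 1 * k ≤ j then pvVal doors j else 0)).sum =
          (((PySem.List.pyRange 0 n k).countP (fun i => !(pvClosed doors i)) : Int) -
            ((PySem.List.pyRange 0 n k).countP (pvClosed doors) : Int)) := by
        rw [List.map_congr_left hmc, sum_map_ite_filter, ← List.sum_cons, ← List.map_cons,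
            ← pyRange_step_eq n k hn (by omega), sum_map_pvVal]
      have hval2 : pvVal doors 0 + ((PySem.List.pyRange 1 n 1).map (fun j =>
             if k ∣ j ∧ 1 ≤ k ∧ 1 * k ≤ j then pvVal doors j else 0)).sum =
          (((PySem.List.pyRange 0 n k).countP (fun i => !(PySem.List.pyGetD doors i 0 == 0)) : Int) -
            ((PySem.List.pyRange 0 n k).countP (fun i => PySem.List.pyGetD doors i 0 == 0) : Int)) := hval
      apply Bool.eq_iff_iff.mpr
      simp only [beq_iff_eq]
      constructor
      · intro h; omega
      · intro h; omega
    rw [hfc]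
  · have hnil : PySem.List.pyRange 1 (n + 1) 1 = [] := PySem.List.pyRange_one_eq_nil (by omega)
    simp [nastya_and_doors, nastya_and_doors_alt, hnil]

-- ===== VERDICT (by name: the statement is the Claim_ definition above) =====
theorem nastya_and_doors_spec : Claim_equal_nastya_and_doors := by
  intro n doors _ _
  unfold Spec_nastya_and_doors
  exact main_eq n doors
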